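-- pv_equiv track=rewrite | github.com/homermalijan/factUapp | Source Code/server/server.py | getSubject
-- ===== SOURCE A (Python) =====
-- def getSubject(tokens):			#gets the subject part of the sentence
--     subj = []
--     consec = False
--     for token in tokens:
--         if token[1][:2]=="NN" or token[1]=="PRP":
--             if token[1][:2]=="NN":
--                 if consec:
--                     subj[len(subj)-1][0] += " " + token[0]
--                 else:
--                     consec = True
--                     subj.append([token[0],token[1],1])
--             else:
--                 consec = False
--                 subj.append([token[0],token[1],1])
--         else:
--             consec = False
--             subj.append([token[0],token[1],0])
--     return subj
-- ===== SOURCE B (Python) =====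
-- def getSubject(tokens):			#gets the subject part of the sentence
--     out = []
--     i = 0
--     n = len(tokens)
--     while i < n:
--         word, tag = tokens[i][0], tokens[i][1]
--         if tag[:2] == "NN":
--             j = i + 1
--             while j < n and tokens[j][1][:2] == "NN":
--                 j += 1
--             out.append([" ".join(t[0] for t in tokens[i:j]), tag, 1])
--             i = j
--         else:
--             out.append([word, tag, 1 if tag == "PRP" else 0])
--             i += 1
--     return out
-- ===== Notes on version B (the rewrite author's own statement) =====
-- stated objective: alternative
-- what changed: Replaces the consec-flag state machine that mutates the last appended entry with run-grouping: each maximal run of NN tokens is consumed at once and emitted as a single joined entry, non-NN tokens are emitted individually.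
import Mathlib
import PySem

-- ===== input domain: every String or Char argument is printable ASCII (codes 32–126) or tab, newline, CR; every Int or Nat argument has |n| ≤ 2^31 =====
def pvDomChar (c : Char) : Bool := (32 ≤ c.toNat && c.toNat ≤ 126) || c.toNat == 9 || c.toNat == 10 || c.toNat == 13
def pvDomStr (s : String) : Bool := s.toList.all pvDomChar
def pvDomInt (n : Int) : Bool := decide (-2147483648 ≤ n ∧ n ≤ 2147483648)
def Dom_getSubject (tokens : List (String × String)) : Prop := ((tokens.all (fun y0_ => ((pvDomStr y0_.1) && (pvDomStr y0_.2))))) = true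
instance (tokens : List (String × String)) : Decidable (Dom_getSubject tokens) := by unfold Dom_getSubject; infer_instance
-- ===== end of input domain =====

-- B replaces A's consec-flag state machine (which mutates the last appended entry) by
-- run-grouping: each maximal NN run is consumed at once and emitted as one joined entry.

-- ===== PORT A =====
-- subj[len(subj)-1][0] += suffix  (the list is nonempty whenever A reaches this line)
def pvAddToLastWord (subj : List (String × String × Int)) (suffix : String) :
    List (String × String × Int) :=
  subj.dropLast ++ (subj.getLast?.map (fun e => (e.1 ++ suffix, e.2))).toList

def pvStepA (s : List (String × String × Int) × Bool) (token : String × String) :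
    List (String × String × Int) × Bool :=
  if (PySem.Str.slice token.2 none (some 2) == "NN") || (token.2 == "PRP") then
    if PySem.Str.slice token.2 none (some 2) == "NN" then
      if s.2 then (pvAddToLastWord s.1 (" " ++ token.1), true)
      else (s.1 ++ [(token.1, token.2, 1)], true)
    else (s.1 ++ [(token.1, token.2, 1)], false)
  else (s.1 ++ [(token.1, token.2, 0)], false)

def getSubject (tokens : List (String × String)) : List (String × String × Int) :=
  (tokens.foldl pvStepA ([], false)).1

-- ===== PORT B =====
def pvIsNN (token : String × String) : Bool :=
  PySem.Str.slice token.2 none (some 2) == "NN"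

def getSubject_alt : List (String × String) → List (String × String × Int)
  | [] => []
  | t :: rest =>
    if pvIsNN t then
      (PySem.Str.join " " ((t :: rest.takeWhile pvIsNN).map (·.1)), t.2, 1) ::
        getSubject_alt (rest.dropWhile pvIsNN)
    else
      (t.1, t.2, if t.2 == "PRP" then 1 else 0) :: getSubject_alt rest
termination_by tokens => tokens.length
decreasing_by
  · simpa using Nat.lt_succ_of_le (List.length_dropWhile_le _ _)
  · simp

-- ===== PRECONDITION & SPEC =====
def Spec_getSubject (tokens : List (String × String)) (out : List (String × String × Int)) : Prop := out = getSubject_alt tokens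
instance (tokens : List (String × String)) (out : List (String × String × Int)) : Decidable (Spec_getSubject tokens out) := by unfold Spec_getSubject; infer_instance

-- ===== CLAIM (what is proved, stated in full; the proofs are below) =====
def Claim_equal_getSubject : Prop := ∀ (tokens : List (String × String)), Dom_getSubject tokens → Spec_getSubject tokens (getSubject tokens)

-- ===== LEMMAS AND PROOFS =====

-- the tail that A's consec loop appends to the run's first word
def pvExt (run : List (String × String)) : String :=
  (run.map (·.1)).foldr (fun s acc => " " ++ s ++ acc) ""

theorem pvJoinWords (l : List String) (w : String) :
    PySem.Str.join " " (w :: l) = w ++ l.foldr (fun s acc => " " ++ s ++ acc) "" := by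
  induction l generalizing w with
  | nil =>
    apply String.ext
    simp [PySem.Str.toList_join, PySem.Chars.join_singleton]
  | cons s l ih =>
    apply String.ext
    have h := congrArg String.toList (ih s)
    simp [PySem.Str.toList_join] at h
    simp [PySem.Str.toList_join, PySem.Chars.join_cons_cons, h]

theorem pvMain (tokens : List (String × String)) :
    (∀ pre, (tokens.foldl pvStepA (pre, false)).1 = pre ++ getSubject_alt tokens) ∧
    (∀ (pre : List (String × String × Int)) (w tag : String),
      (tokens.foldl pvStepA (pre ++ [(w, tag, 1)], true)).1 =
        pre ++ (w ++ pvExt (tokens.takeWhile pvIsNN), tag, 1) ::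
          getSubject_alt (tokens.dropWhile pvIsNN)) := by
  induction tokens with
  | nil => simp [getSubject_alt, pvExt]
  | cons t rest ih =>
    refine ⟨?_, ?_⟩
    · intro pre
      by_cases hnn : PySem.Str.slice t.2 none (some 2) = "NN"
      · have hb : pvIsNN t = true := by simp [pvIsNN, hnn]
        rw [List.foldl_cons]
        have hstep : pvStepA (pre, false) t = (pre ++ [(t.1, t.2, 1)], true) := by
          simp [pvStepA, hnn]
        rw [hstep, ih.2 pre t.1 t.2, getSubject_alt]
        simp [hb, pvJoinWords, pvExt]
      · have hb : pvIsNN t = false := by simp [pvIsNN, hnn]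
        rw [List.foldl_cons, getSubject_alt]
        by_cases hprp : t.2 = "PRP"
        · have hstep : pvStepA (pre, false) t = (pre ++ [(t.1, t.2, 1)], false) := by
            simp [pvStepA, hprp]
            decide
          rw [hstep, ih.1]
          simp [hb, hprp]
        · have hstep : pvStepA (pre, false) t = (pre ++ [(t.1, t.2, 0)], false) := by
            simp [pvStepA, hnn, hprp]
          rw [hstep, ih.1]
          simp [hb, hprp]
    · intro pre w tag
      by_cases hnn : PySem.Str.slice t.2 none (some 2) = "NN"
      · have hb : pvIsNN t = true := by simp [pvIsNN, hnn]
        rw [List.foldl_cons]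
        have hstep : pvStepA (pre ++ [(w, tag, 1)], true) t =
            (pre ++ [(w ++ (" " ++ t.1), tag, 1)], true) := by
          simp [pvStepA, hnn, pvAddToLastWord]
        rw [hstep, ih.2 pre (w ++ (" " ++ t.1)) tag,
            List.takeWhile_cons_of_pos hb, List.dropWhile_cons_of_pos hb]
        simp [pvExt, String.append_assoc]
      · have hb : pvIsNN t = false := by simp [pvIsNN, hnn]
        rw [List.foldl_cons]
        by_cases hprp : t.2 = "PRP"
        · have hstep : pvStepA (pre ++ [(w, tag, 1)], true) t =
              ((pre ++ [(w, tag, 1)]) ++ [(t.1, t.2, 1)], false) := by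
            simp [pvStepA, hprp]
            decide
          have hb' : ¬ pvIsNN t = true := by simp [hb]
          rw [hstep, ih.1, List.takeWhile_cons_of_neg hb', List.dropWhile_cons_of_neg hb',
              getSubject_alt]
          simp [hb, hprp, pvExt]
        · have hstep : pvStepA (pre ++ [(w, tag, 1)], true) t =
              ((pre ++ [(w, tag, 1)]) ++ [(t.1, t.2, 0)], false) := by
            simp [pvStepA, hnn, hprp]
          have hb' : ¬ pvIsNN t = true := by simp [hb]
          rw [hstep, ih.1, List.takeWhile_cons_of_neg hb', List.dropWhile_cons_of_neg hb',
              getSubject_alt]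
          simp [hb, hprp, pvExt]

-- ===== VERDICT (by name: the statement is the Claim_ definition above) =====
theorem getSubject_spec : Claim_equal_getSubject := by
  intro tokens _
  unfold Spec_getSubject getSubject
  simpa using (pvMain tokens).1 []
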